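-- pv_equiv track=rewrite | github.com/LunaciaDev/adventofcode | 2016/Day 09/solution.py | taskTwo
-- ===== SOURCE A (Python) =====
-- def taskTwo(inputStream):
--     currentIndex = 0
--     inputLength = len(inputStream) - 1
--     extractedStreamLength = 0
--
--     while currentIndex <= inputLength:
--         if inputStream[currentIndex] == "(":
--             bracketStart = currentIndex
--
--             while currentIndex <= inputLength:
--                 currentIndex += 1
--                 if inputStream[currentIndex] == ")": break
--
--             bracketEnd = currentIndex
--             expansionData = inputStream[bracketStart+1 : bracketEnd].split("x")
--
--             currentIndex += int(expansionData[0]) + 1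
--
--             extractedStreamLength += taskTwo(inputStream[bracketEnd + 1 : bracketEnd + 1 + int(expansionData[0])]) * int(expansionData[1])
--
--             continue
--
--         startingIndex = currentIndex
--
--         while currentIndex < inputLength:
--             if inputStream[currentIndex+1] == "(": break
--             currentIndex += 1
--
--         extractedStreamLength += currentIndex - startingIndex + 1
--
--         currentIndex += 1
--
--     return(extractedStreamLength)
-- ===== SOURCE B (Python) =====
-- def taskTwo(inputStream):
--     # Single left-to-right scan: instead of recursing on slices, keep a per-character
--     # multiplier array; a marker (axb) multiplies the weights of the next a characters by b.
--     n = len(inputStream)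
--     weights = [1] * n
--     total = 0
--     i = 0
--     while i < n:
--         if inputStream[i] == "(":
--             j = inputStream.index(")", i)
--             a, b = inputStream[i + 1 : j].split("x")
--             a = int(a)
--             b = int(b)
--             for k in range(j + 1, min(j + 1 + a, n)):
--                 weights[k] *= b
--             i = j + 1
--         else:
--             total += weights[i]
--             i += 1
--     return total
-- ===== Notes on version B (the rewrite author's own statement) =====
-- stated objective: alternative
-- what changed: Replaces A's recursive descent over string slices with a single left-to-right scan that keeps a per-character multiplier array (a marker (axb) multiplies the weights of the next a characters by b): no recursion and no slice copies, at similar measured cost.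
-- outside the precondition, e.g. on taskTwo('(1x2x3)AB'): A returns 3, B raises ValueError; on taskTwo('(5x2)(9x3)ABCD'): A returns 4, B returns 12
import Mathlib
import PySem

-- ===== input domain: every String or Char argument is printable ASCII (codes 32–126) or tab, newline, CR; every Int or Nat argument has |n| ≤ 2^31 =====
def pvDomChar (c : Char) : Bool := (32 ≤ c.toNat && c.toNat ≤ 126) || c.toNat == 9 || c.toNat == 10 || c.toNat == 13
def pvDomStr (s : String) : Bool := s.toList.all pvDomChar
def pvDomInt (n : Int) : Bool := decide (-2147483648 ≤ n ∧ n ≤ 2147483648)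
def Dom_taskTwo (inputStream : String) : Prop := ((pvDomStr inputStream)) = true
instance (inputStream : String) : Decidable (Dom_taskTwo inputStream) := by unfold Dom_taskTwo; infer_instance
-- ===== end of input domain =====

-- B replaces A's recursive descent over string slices by one left-to-right scan with a
-- per-character multiplier array (objective: alternative; neither program mutates its argument).

-- ===== PORT A =====
-- A's inner "scan to the closing ')'" loop: while currentIndex <= inputLength: currentIndex += 1; if s[currentIndex] == ")": break
-- none = Python raises IndexError (or, unreachably from A's call site, falls out of the loop).
def findCloseA (sl : List Char) (il : Int) : Nat → Int → Option Int
  | 0, _ => none      -- fuel guard only (fuel exceeds the possible number of iterations)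
  | g + 1, ci =>
    if ci ≤ il then
      match PySem.List.pyGet? sl (ci + 1) with
      | none => none  -- Python: IndexError
      | some c => if c = ')' then some (ci + 1) else findCloseA sl il g (ci + 1)
    else none         -- unreachable: entered only with ci ≤ il (Python would fall through)

-- A's literal-run loop: while currentIndex < inputLength: if s[currentIndex+1] == "(": break; currentIndex += 1
def runEndA (sl : List Char) (il : Int) : Nat → Int → Int
  | 0, ci => ci       -- fuel guard only
  | g + 1, ci =>
    if ci < il then
      match PySem.List.pyGet? sl (ci + 1) with
      | none => ci    -- unreachable: ci + 1 ≤ il < len(sl)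
      | some c => if c = '(' then ci else runEndA sl il g (ci + 1)
    else ci

-- A's main while loop (and, at a marker, A's recursive self-call on the slice).
-- The fuel only makes the recursion total; on inputs where Python raises it returns the
-- accumulator (those inputs are excluded by Pre_taskTwo).
def loopA : Nat → List Char → Int → Int → Int → Int
  | 0, _, _, _, acc => acc
  | g + 1, sl, il, ci, acc =>
    if ci ≤ il then
      match PySem.List.pyGet? sl ci with
      | none => acc                       -- Python: IndexError
      | some c =>
        if c = '(' then
          match findCloseA sl il (sl.length + 2) ci with
          | none => acc                   -- Python: IndexError while scanning for ')'
          | some be =>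
            let expansionData := PySem.Chars.splitOn (PySem.List.slice sl (some (ci + 1)) (some be)) ['x']
            match PySem.List.pyGet? expansionData 0 >>= PySem.Int.ofChars?,
                  PySem.List.pyGet? expansionData 1 >>= PySem.Int.ofChars? with
            | some a, some b =>
              let nested := loopA g (PySem.List.slice sl (some (be + 1)) (some (be + 1 + a)))
                              (PySem.List.len (PySem.List.slice sl (some (be + 1)) (some (be + 1 + a))) - 1) 0 0
              loopA g sl il (be + (a + 1)) (acc + nested * b)
            | _, _ => acc                 -- Python: IndexError/ValueError from split/int
        else
          let e := runEndA sl il (sl.length + 2) ci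
          loopA g sl il (e + 1) (acc + (e - ci + 1))
    else acc

def taskTwo (inputStream : String) : Int :=
  let sl := inputStream.toList
  loopA (sl.length + 1) sl (PySem.List.len sl - 1) 0 0

-- ===== PORT B =====
-- B's inner loop: for k in range(j + 1, min(j + 1 + a, n)): weights[k] *= b
def mulLoopB (b lo hi : Int) (w : List Int) : List Int :=
  (PySem.List.pyRange lo hi 1).foldl
    (fun w k => PySem.List.pySetD w k (PySem.List.pyGetD w k 0 * b)) w

-- B's single scan: weights[i] is the multiplier the character at i contributes with.
def loopB : Nat → List Char → Int → List Int → Int → Int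
  | 0, _, _, _, tot => tot                -- fuel guard only
  | g + 1, sl, i, w, tot =>
    if i < PySem.List.len sl then
      match PySem.List.pyGet? sl i with
      | none => tot                       -- unreachable: 0 ≤ i < len is maintained
      | some c =>
        if c = '(' then
          let j := PySem.Chars.findFrom sl [')'] i
          if j = -1 then tot              -- Python: ValueError from index()
          else
            match PySem.Chars.splitOn (PySem.List.slice sl (some (i + 1)) (some j)) ['x'] with
            | [a0, b0] =>
              match PySem.Int.ofChars? a0, PySem.Int.ofChars? b0 with
              | some a, some b =>
                  loopB g sl (j + 1) (mulLoopB b (j + 1) (min (j + 1 + a) (PySem.List.len sl)) w) tot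
              | _, _ => tot               -- Python: ValueError from int()
            | _ => tot                    -- Python: ValueError from tuple unpacking
        else
          loopB g sl (i + 1) w (tot + PySem.List.pyGetD w i 0)
    else tot

def taskTwo_alt (inputStream : String) : Int :=
  let sl := inputStream.toList
  loopB (sl.length + 1) sl 0 (List.replicate sl.length 1) 0

-- ===== PRECONDITION & SPEC =====
-- Shape of one well-formed marker at the head of a suffix: "(AxB)" where the part up to the
-- FIRST ')' splits on 'x' into exactly two int()-able fields, A is nonnegative and does not
-- run past the end of the remaining text. Returns (index of ')', value of A, value of B, rest).
def parseMarker (r : List Char) : Option (Nat × Nat × Int × List Char) :=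
  match PySem.List.index? r ')' with
  | none => none
  | some j =>
    match PySem.List.index? (r.take j) 'x' with
    | none => none
    | some k =>
      if 'x' ∈ (r.take j).drop (k + 1) then none
      else
        match PySem.Int.ofChars? ((r.take j).take k), PySem.Int.ofChars? ((r.take j).drop (k + 1)) with
        | some a, some b => if 0 ≤ a ∧ a.toNat ≤ (r.drop (j + 1)).length then some (j, a.toNat, b, r.drop (j + 1)) else none
        | _, _ => none

-- The grammar check recurses on the marker body and the remainder; the first (Nat) argument
-- is only a structural depth bound (any value ≥ the text length gives the same answer,
-- see wfmF_congr below) so that the predicate is kernel-computable. It checks marker SYNTAX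
-- only; it never computes a decompressed length.
def wfmF : Nat → List Char → Bool
  | _, [] => true
  | 0, _ :: _ => false      -- unreachable: the depth bound never runs out (wfmF_congr)
  | f + 1, c :: r =>
    if c = '(' then
      match parseMarker r with
      | none => false
      | some (_, a, _, rest) => wfmF f (rest.take a) && wfmF f (rest.drop a)
    else wfmF f r

def wfm (s : List Char) : Bool := wfmF s.length s

def Pre_taskTwo (inputStream : String) : Prop := wfm inputStream.toList = true
instance (inputStream : String) : Decidable (Pre_taskTwo inputStream) := by unfold Pre_taskTwo; infer_instance

def pvWitness_taskTwo : String := "X(8x2)(3x3)ABCY"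

def Spec_taskTwo (inputStream : String) (out : Int) : Prop := out = taskTwo_alt inputStream
instance (inputStream : String) (out : Int) : Decidable (Spec_taskTwo inputStream out) := by unfold Spec_taskTwo; infer_instance

-- ===== CLAIM (what is proved, stated in full; the proofs are below) =====
def Claim_equal_taskTwo : Prop := ∀ (inputStream : String), Dom_taskTwo inputStream → Pre_taskTwo inputStream → Spec_taskTwo inputStream (taskTwo inputStream)

-- ===== LEMMAS AND PROOFS =====

theorem parseMarker_rest_lt {r : List Char} {j a : Nat} {b : Int} {rest : List Char}
    (h : parseMarker r = some (j, a, b, rest)) : rest.length < r.length := by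
  unfold parseMarker at h
  split at h
  · simp at h
  · rename_i j' hj
    split at h
    · simp at h
    · split at h
      · simp at h
      · split at h
        · split at h
          · injection h with h'
            simp only [Prod.mk.injEq] at h'
            obtain ⟨-, -, -, h4⟩ := h'
            obtain ⟨hlt, -, -⟩ := PySem.List.getElem_of_index?_eq_some hj
            subst h4; simp; omega
          · simp at h
        · simp at h

-- Pre_taskTwo: the AoC-grammar inputs. It excludes (a) inputs where A raises or diverges
-- (unclosed '(' , "()" , non-int or negative length fields), and (b) inputs with
-- non-canonical markers on which A still returns a value: markers whose body has more than
-- one 'x' (A silently ignores the extra fields) and markers whose length field overruns the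
-- scope they sit in (there A's recursion truncates while a flat reading does not; both are
-- defensible on such out-of-grammar input).

-- The common specification: W u w is the decompressed length of the suffix u when the
-- character at offset p of u counts with weight w[p] (a marker "(AxB)" spans j+2 characters).
def W : List Char → List Int → Int
  | [], _ => 0
  | c :: r, w =>
    if c = '(' then
      match hp : parseMarker r with
      | none => 0
      | some (j, a, b, rest) =>
        b * W (rest.take a) ((w.drop (j + 2)).take a) + W (rest.drop a) ((w.drop (j + 2)).drop a)
    else w.headD 0 + W r w.tail
termination_by s _ => s.length
decreasing_by
  · have h1 := parseMarker_rest_lt hp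
    have : (rest.take a).length ≤ rest.length := by simp
    simp; omega
  · have h1 := parseMarker_rest_lt hp
    have : (rest.drop a).length ≤ rest.length := by simp
    simp; omega
  · simp

theorem wfmF_congr : ∀ (f1 : Nat) (s : List Char) (f2 : Nat), s.length ≤ f1 → s.length ≤ f2 →
    wfmF f1 s = wfmF f2 s := by
  intro f1
  induction f1 with
  | zero =>
    intro s f2 h1 h2
    have : s = [] := by cases s with | nil => rfl | cons x xs => simp at h1
    subst this
    cases f2 <;> rfl
  | succ f1 ih =>
    intro s f2 h1 h2
    cases s with
    | nil => cases f2 <;> rfl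
    | cons c r =>
      cases f2 with
      | zero => simp at h2
      | succ f2 =>
        simp only [wfmF]
        by_cases hc : c = '('
        · rw [if_pos hc, if_pos hc]
          cases hp : parseMarker r with
          | none => rfl
          | some t =>
            obtain ⟨j, a, b, rest⟩ := t
            have hlt := parseMarker_rest_lt hp
            simp only [List.length_cons] at h1 h2
            simp only [hp]
            rw [ih (rest.take a) f2 (by simp; omega) (by simp; omega),
                ih (rest.drop a) f2 (by simp; omega) (by simp; omega)]
        · rw [if_neg hc, if_neg hc]
          exact ih r f2 (by simp at h1; omega) (by simp at h2; omega)

theorem wfm_lit {c : Char} (r : List Char) (h : c ≠ '(') : wfm (c :: r) = wfm r := by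
  unfold wfm
  simp only [List.length_cons, wfmF, if_neg h]

theorem wfm_marker {r : List Char} {j a : Nat} {b : Int} {rest : List Char}
    (h : parseMarker r = some (j, a, b, rest)) :
    wfm ('(' :: r) = (wfm (rest.take a) && wfm (rest.drop a)) := by
  have hlt := parseMarker_rest_lt h
  unfold wfm
  simp only [List.length_cons, wfmF, if_pos rfl, h, if_true]
  rw [wfmF_congr r.length (rest.take a) (rest.take a).length (by simp; omega) le_rfl,
      wfmF_congr r.length (rest.drop a) (rest.drop a).length (by simp; omega) le_rfl]

theorem W_nil (w : List Int) : W [] w = 0 := by simp [W]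
theorem W_lit {c : Char} (r : List Char) (w : List Int) (h : c ≠ '(') :
    W (c :: r) w = w.headD 0 + W r w.tail := by
  rw [W]; simp [h]
theorem W_marker {r : List Char} {j a : Nat} {b : Int} {rest : List Char} (w : List Int)
    (h : parseMarker r = some (j, a, b, rest)) :
    W ('(' :: r) w = b * W (rest.take a) ((w.drop (j + 2)).take a)
        + W (rest.drop a) ((w.drop (j + 2)).drop a) := by
  rw [W]
  simp only [reduceIte, if_pos rfl]
  split
  · rename_i heq; rw [h] at heq; cases heq
  · rename_i j' a' b' rest' heq
    rw [h] at heq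
    injection heq with heq'
    simp only [Prod.mk.injEq] at heq'
    obtain ⟨rfl, rfl, rfl, rfl⟩ := heq'
    rfl

theorem drop_append_ge {α : Type} (l1 l2 : List α) (n : Nat) (h : l1.length ≤ n) :
    (l1 ++ l2).drop n = l2.drop (n - l1.length) := by
  rw [List.drop_append, List.drop_of_length_le h]; simp

theorem index?_of_decomp {α : Type} [BEq α] [LawfulBEq α] (pre suf : List α) (c : α) (h : c ∉ pre) :
    PySem.List.index? (pre ++ c :: suf) c = some pre.length := by
  rw [PySem.List.index?_eq_some_iff]; exact ⟨pre, suf, rfl, rfl, h⟩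

-- Constructor form of parseMarker.
theorem parseMarker_mk (A B rest : List Char) {av b : Int}
    (hp : ')' ∉ A ++ 'x' :: B) (hA : 'x' ∉ A) (hB : 'x' ∉ B)
    (ha : PySem.Int.ofChars? A = some av) (hav : 0 ≤ av) (hb : PySem.Int.ofChars? B = some b)
    (hle : av.toNat ≤ rest.length) :
    parseMarker ((A ++ 'x' :: B) ++ ')' :: rest) = some (A.length + 1 + B.length, av.toNat, b, rest) := by
  have hj : PySem.List.index? ((A ++ 'x' :: B) ++ ')' :: rest) ')' = some (A ++ 'x' :: B).length :=
    index?_of_decomp _ _ _ hp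
  have hxB : 'x' ∉ B := hB
  have hk : PySem.List.index? (A ++ 'x' :: B) 'x' = some A.length := index?_of_decomp _ _ _ hA
  have ht : (A ++ 'x' :: B).take A.length = A := List.take_left ..
  have hd : (A ++ 'x' :: B).drop (A.length + 1) = B := by
    rw [drop_append_ge _ _ _ (by omega)]; simp
  have hrest : (((A ++ 'x' :: B)) ++ ')' :: rest).drop ((A ++ 'x' :: B).length + 1) = rest := by
    rw [drop_append_ge _ _ _ (by omega)]; simp
  unfold parseMarker
  simp only [hj, List.take_left, hk, ht, hd, hrest, ha, hb]
  rw [if_neg (by simpa using hB), if_pos ⟨hav, by simpa using hle⟩]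
  simp [List.length_append, List.length_cons]; omega

-- Structure extracted from a successful parse.
theorem parseMarker_some {r : List Char} {j a : Nat} {b : Int} {rest : List Char}
    (h : parseMarker r = some (j, a, b, rest)) :
    ∃ (A B : List Char) (av : Int),
      r = (A ++ 'x' :: B) ++ ')' :: rest ∧ j = A.length + 1 + B.length ∧
      ')' ∉ A ++ 'x' :: B ∧ 'x' ∉ A ∧ 'x' ∉ B ∧
      PySem.Int.ofChars? A = some av ∧ 0 ≤ av ∧ a = av.toNat ∧
      PySem.Int.ofChars? B = some b ∧ a ≤ rest.length := by
  unfold parseMarker at h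
  split at h
  · simp at h
  · rename_i j' hj
    split at h
    · simp at h
    · rename_i k hk
      split at h
      · simp at h
      · rename_i hxB
        split at h
        · rename_i av bv hab hbb
          split at h
          · rename_i hcond
            injection h with h'
            simp only [Prod.mk.injEq] at h'
            obtain ⟨rfl, rfl, rfl, rfl⟩ := h'
            obtain ⟨pre, suf, hr, hlen, hnp⟩ := (PySem.List.index?_eq_some_iff _ _ _).mp hj
            obtain ⟨A, B', hc, hlenA, hnA⟩ := (PySem.List.index?_eq_some_iff _ _ _).mp hk
            have htake : r.take j' = pre := by rw [hr, ← hlen, List.take_left]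
            have hdrop : r.drop (j' + 1) = suf := by
              rw [hr, ← hlen, drop_append_ge _ _ _ (by omega)]
              simp
            have hpreAB : pre = A ++ 'x' :: B' := by rw [← htake, hc]
            have hBd : (r.take j').drop (k + 1) = B' := by
              rw [hc, ← hlenA, drop_append_ge _ _ _ (by omega)]; simp
            have hAt : (r.take j').take k = A := by rw [hc, ← hlenA, List.take_left]
            refine ⟨A, B', av, ?_, ?_, ?_, hnA, ?_, ?_, hcond.1, rfl, ?_, ?_⟩
            · rw [hdrop, hr, hpreAB]
            · rw [← hlen, hpreAB]; simp; try omega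
            · rw [← hpreAB]; exact hnp
            · rw [hBd] at hxB; exact hxB
            · rw [hAt] at hab; exact hab
            · rw [hBd] at hbb; exact hbb
            · exact hcond.2
          · simp at h
        · simp at h

theorem parseMarker_append {r q : List Char} {j a : Nat} {b : Int} {rest : List Char}
    (h : parseMarker r = some (j, a, b, rest)) :
    parseMarker (r ++ q) = some (j, a, b, rest ++ q) := by
  obtain ⟨A, B, av, hr, hj, hnp, hA, hB, ha, hav, rfl, hb, hle⟩ := parseMarker_some h
  have := parseMarker_mk A B (rest ++ q) hnp hA hB ha hav hb (by simp; omega)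
  rw [hr]; simpa [hj] using this

theorem splitOn_go_nosep (l : List Char) (hl : 'x' ∉ l) :
    ∀ (fuel : Nat) (cur : List Char) (acc : List (List Char)),
      PySem.Chars.splitOn.go ['x'] fuel l cur acc = ((cur.reverse ++ l) :: acc).reverse := by
  induction l with
  | nil => intro fuel cur acc; cases fuel <;> (rw [PySem.Chars.splitOn.go.eq_def]; try simp)
  | cons c rest ih =>
    intro fuel cur acc
    have hc : c ≠ 'x' := by intro h; exact hl (h ▸ List.mem_cons_self ..)
    have hpre : List.isPrefixOf ['x'] (c :: rest) = false := by
      simp [List.isPrefixOf]; intro hh; exact absurd hh.symm hc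
    cases fuel with
    | zero => rw [PySem.Chars.splitOn.go.eq_def]
    | succ g =>
      rw [PySem.Chars.splitOn.go.eq_def]
      simp only [hpre, Bool.false_eq_true, if_false]
      rw [ih (fun h => hl (List.mem_cons_of_mem _ h)) g (c :: cur) acc]; simp

theorem splitOn_two (A B : List Char) (hA : 'x' ∉ A) (hB : 'x' ∉ B) :
    PySem.Chars.splitOn (A ++ 'x' :: B) ['x'] = [A, B] := by
  have go2 : ∀ (A' : List Char), 'x' ∉ A' → ∀ (fuel : Nat) (cur : List Char) (acc : List (List Char)),
      fuel ≥ A'.length + 1 →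
      PySem.Chars.splitOn.go ['x'] fuel (A' ++ 'x' :: B) cur acc
        = acc.reverse ++ [cur.reverse ++ A', B] := by
    intro A'
    induction A' with
    | nil =>
      intro _ fuel cur acc hf
      cases fuel with
      | zero => omega
      | succ g =>
        have hpre : List.isPrefixOf ['x'] ('x' :: B) = true := by simp [List.isPrefixOf]
        simp only [List.nil_append]
        rw [PySem.Chars.splitOn.go.eq_def]
        simp only [hpre, if_true]
        rw [show (List.drop ['x'].length ('x' :: B)) = B by simp]
        rw [splitOn_go_nosep B hB g [] (cur.reverse :: acc)]
        simp
    | cons c A'' ih =>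
      intro hA' fuel cur acc hf
      have hc : c ≠ 'x' := by intro h; exact hA' (h ▸ List.mem_cons_self ..)
      cases fuel with
      | zero => simp at hf
      | succ g =>
        have hpre : List.isPrefixOf ['x'] (c :: (A'' ++ 'x' :: B)) = false := by
          simp [List.isPrefixOf]; intro hh; exact absurd hh.symm hc
        simp only [List.cons_append]
        rw [PySem.Chars.splitOn.go.eq_def]
        simp only [hpre, Bool.false_eq_true, if_false]
        rw [ih (fun h => hA' (List.mem_cons_of_mem _ h)) g (c :: cur) acc (by simp at hf ⊢; omega)]
        simp
  unfold PySem.Chars.splitOn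
  rw [go2 A hA (((A ++ 'x' :: B)).length + 1) [] [] (by simp; try omega)]
  simp

theorem wfm_marker_none {r : List Char} (h : parseMarker r = none) : wfm ('(' :: r) = false := by
  unfold wfm
  simp only [List.length_cons, wfmF, if_pos rfl, h, if_true]

theorem W_marker_none {r : List Char} (w : List Int) (h : parseMarker r = none) :
    W ('(' :: r) w = 0 := by
  rw [W]
  simp only [reduceIte]
  split
  · rfl
  · rename_i heq; rw [h] at heq; cases heq

theorem parseMarker_len {r : List Char} {j a : Nat} {b : Int} {rest : List Char}
    (h : parseMarker r = some (j, a, b, rest)) :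
    r.length = j + 1 + rest.length ∧ a ≤ rest.length := by
  obtain ⟨A, B, av, hr, hj, -, -, -, -, -, rfl, -, hle⟩ := parseMarker_some h
  constructor
  · rw [hr]; simp; omega
  · exact hle

theorem W_empty_aux : ∀ (n : Nat) (u : List Char), u.length ≤ n → W u [] = 0 := by
  intro n
  induction n with
  | zero =>
    intro u hu
    have : u = [] := by cases u with | nil => rfl | cons x xs => simp at hu
    subst this; simp [W_nil]
  | succ n ih =>
    intro u hu
    match u with
    | [] => simp [W_nil]
    | c :: r =>
      by_cases hc : c = '('
      · subst hc
        cases hp : parseMarker r with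
        | none => rw [W_marker_none _ hp]
        | some t =>
          obtain ⟨j, a, b', rest⟩ := t
          have hlt := parseMarker_rest_lt hp
          rw [W_marker _ hp]
          simp only [List.drop_nil, List.take_nil]
          rw [ih (rest.take a) (by simp at hu ⊢; omega), ih (rest.drop a) (by simp at hu ⊢; omega)]
          ring
      · rw [W_lit _ _ hc]
        simp only [List.headD_nil, List.tail_nil]
        rw [ih r (by simp at hu; omega)]; ring

theorem W_empty (u : List Char) : W u [] = 0 := W_empty_aux u.length u le_rfl

theorem W_mul_aux : ∀ (n : Nat) (u : List Char), u.length ≤ n → ∀ (w : List Int) (b : Int),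
    W u (w.map (fun v => v * b)) = W u w * b := by
  intro n
  induction n with
  | zero =>
    intro u hu w b
    have : u = [] := by cases u with | nil => rfl | cons x xs => simp at hu
    subst this; simp [W_nil]
  | succ n ih =>
    intro u hu w b
    match u with
    | [] => simp [W_nil]
    | c :: r =>
      by_cases hc : c = '('
      · subst hc
        cases hp : parseMarker r with
        | none => rw [W_marker_none _ hp, W_marker_none _ hp]; simp
        | some t =>
          obtain ⟨j, a, b', rest⟩ := t
          have hlt := parseMarker_rest_lt hp
          rw [W_marker _ hp, W_marker _ hp]
          simp only [← List.map_drop, ← List.map_take]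
          rw [ih (rest.take a) (by simp at hu ⊢; omega) (((w.drop (j+2)).take a)) b,
              ih (rest.drop a) (by simp at hu ⊢; omega) (((w.drop (j+2)).drop a)) b]
          ring
      · rw [W_lit _ _ hc, W_lit _ _ hc]
        have hr : r.length ≤ n := by simp at hu; omega
        cases w with
        | nil => simp only [List.map_nil, List.headD_nil, List.tail_nil, W_empty]; ring
        | cons v w' =>
          simp only [List.map_cons, List.headD_cons, List.tail_cons]
          rw [ih r hr w' b]; ring

theorem W_mul (u : List Char) (w : List Int) (b : Int) :
    W u (w.map (fun v => v * b)) = W u w * b :=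
  W_mul_aux u.length u le_rfl w b

theorem W_append_aux : ∀ (n : Nat) (p : List Char), p.length ≤ n →
    ∀ (q : List Char) (wp wq : List Int), wfm p = true → wp.length = p.length →
    W (p ++ q) (wp ++ wq) = W p wp + W q wq := by
  intro n
  induction n with
  | zero =>
    intro p hp q wp wq hwf hl
    have : p = [] := by cases p with | nil => rfl | cons x xs => simp at hp
    subst this
    have : wp = [] := List.eq_nil_of_length_eq_zero (by simpa using hl)
    subst this; simp [W_nil]
  | succ n ih =>
    intro p hp q wp wq hwf hl
    match p with
    | [] =>
      have : wp = [] := List.eq_nil_of_length_eq_zero (by simpa using hl)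
      subst this; simp [W_nil]
    | c :: r =>
      by_cases hc : c = '('
      · subst hc
        cases hpm : parseMarker r with
        | none => rw [wfm_marker_none hpm] at hwf; cases hwf
        | some t =>
          obtain ⟨j, a, b', rest⟩ := t
          obtain ⟨hrlen, hale⟩ := parseMarker_len hpm
          have hlt := parseMarker_rest_lt hpm
          have hwf' := (wfm_marker hpm) ▸ hwf
          have hw2 : wfm (rest.drop a) = true := by
            rcases Bool.and_eq_true .. |>.mp hwf' with ⟨-, h2⟩; exact h2
          have hpq : parseMarker (r ++ q) = some (j, a, b', rest ++ q) := parseMarker_append hpm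
          have hwplen : wp.length = r.length + 1 := by simpa using hl
          rw [List.cons_append, W_marker _ hpq, W_marker _ hpm]
          rw [List.take_append_of_le_length hale, List.drop_append_of_le_length hale]
          rw [List.drop_append_of_le_length (by omega)]
          rw [List.take_append_of_le_length (by simp; omega),
              List.drop_append_of_le_length (by simp; omega)]
          rw [ih (rest.drop a) (by simp at hp ⊢; omega) q _ wq hw2 (by simp; omega)]
          ring
      · match wp with
        | [] => simp at hl
        | v :: wp' =>
          have hwfr : wfm r = true := by rwa [wfm_lit _ hc] at hwf
          rw [List.cons_append, List.cons_append, W_lit _ _ hc, W_lit _ _ hc]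
          simp only [List.headD_cons, List.tail_cons]
          rw [ih r (by simp at hp; omega) q wp' wq hwfr (by simpa using hl)]
          ring

theorem W_append (p q : List Char) (wp wq : List Int) (hwf : wfm p = true)
    (hl : wp.length = p.length) : W (p ++ q) (wp ++ wq) = W p wp + W q wq :=
  W_append_aux p.length p le_rfl q wp wq hwf hl

theorem findCloseA_spec (sl : List Char) :
    ∀ (content : List Char) (g m : Nat) (rest : List Char),
      sl.drop (m + 1) = content ++ ')' :: rest → ')' ∉ content → g ≥ content.length + 1 →
      findCloseA sl ((sl.length : Int) - 1) g (m : Int) = some ((m + 1 + content.length : Nat) : Int) := by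
  intro content
  induction content with
  | nil =>
    intro g m rest hd hnc hg
    cases g with
    | zero => omega
    | succ g' =>
      have hlen : m + 1 < sl.length := by
        have := congrArg List.length hd; simp at this; omega
      have hget : PySem.List.pyGet? sl ((m : Int) + 1) = some ')' := by
        have h1 : (sl.drop (m + 1))[(0 : Nat)]? = sl[m + 1 + 0]? := List.getElem?_drop ..
        rw [hd] at h1
        rw [show ((m : Int) + 1) = ((m + 1 : Nat) : Int) by omega,
            PySem.List.pyGet?_natCast]
        simpa using h1.symm
      rw [findCloseA, if_pos (by push_cast; omega)]
      simp only [hget, if_true, reduceIte]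
      simp
  | cons x content' ih =>
    intro g m rest hd hnc hg
    cases g with
    | zero => simp at hg
    | succ g' =>
      have hlen : m + 1 < sl.length := by
        have := congrArg List.length hd; simp at this; omega
      have hx : x ≠ ')' := fun h => hnc (h ▸ List.mem_cons_self ..)
      have hget : PySem.List.pyGet? sl ((m : Int) + 1) = some x := by
        have h1 : (sl.drop (m + 1))[(0 : Nat)]? = sl[m + 1 + 0]? := List.getElem?_drop ..
        rw [hd] at h1
        rw [show ((m : Int) + 1) = ((m + 1 : Nat) : Int) by omega,
            PySem.List.pyGet?_natCast]
        simpa using h1.symm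
      have hd' : sl.drop (m + 1 + 1) = content' ++ ')' :: rest := by
        rw [← List.drop_drop, hd]; simp
      rw [findCloseA, if_pos (by push_cast; omega)]
      simp only [hget]
      rw [if_neg hx]
      rw [show ((m : Int) + 1) = ((m + 1 : Nat) : Int) by omega]
      rw [ih g' (m + 1) rest hd' (fun h => hnc (List.mem_cons_of_mem _ h)) (by simp at hg ⊢; omega)]
      congr 1
      simp only [List.length_cons]
      push_cast; ring

theorem runEndA_spec (sl : List Char) :
    ∀ (g m : Nat), m < sl.length → g ≥ sl.length - m →
      ∃ e : Nat, runEndA sl ((sl.length : Int) - 1) g (m : Int) = (e : Int) ∧ m ≤ e ∧ e < sl.length ∧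
        (∀ k : Nat, m < k → k ≤ e → sl[k]? ≠ some '(') ∧
        (e + 1 = sl.length ∨ sl[e + 1]? = some '(') := by
  intro g
  induction g with
  | zero => intro m hm hg; omega
  | succ g' ih =>
    intro m hm hg
    by_cases hcond : m + 1 < sl.length
    · have hget0 : ∃ c, PySem.List.pyGet? sl ((m : Int) + 1) = some c ∧ sl[m + 1]? = some c := by
        refine ⟨sl[m + 1], ?_, by simp⟩
        rw [show ((m : Int) + 1) = ((m + 1 : Nat) : Int) by omega,
            PySem.List.pyGet?_natCast]
        simp
      obtain ⟨c, hget, hgetl⟩ := hget0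
      by_cases hc : c = '('
      · refine ⟨m, ?_, le_refl m, hm, by omega, Or.inr (hc ▸ hgetl)⟩
        rw [runEndA, if_pos (by push_cast; omega)]
        simp only [hget]
        rw [if_pos hc]
      · obtain ⟨e, he, h1, h2, h3, h4⟩ := ih (m + 1) hcond (by omega)
        refine ⟨e, ?_, by omega, h2, ?_, h4⟩
        · rw [runEndA, if_pos (by push_cast; omega)]
          simp only [hget]
          rw [if_neg hc, show ((m : Int) + 1) = ((m + 1 : Nat) : Int) by omega]
          exact he
        · intro k hk1 hk2
          by_cases hkm : k = m + 1
          · subst hkm; rw [hgetl]; simp [hc]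
          · exact h3 k (by omega) hk2
    · refine ⟨m, ?_, le_refl m, hm, by omega, Or.inl (by omega)⟩
      rw [runEndA, if_neg (by push_cast; omega)]

theorem W_lit_run (sl : List Char) :
    ∀ (d m : Nat), m + d < sl.length →
      (∀ k : Nat, m ≤ k → k ≤ m + d → sl[k]? ≠ some '(') → wfm (sl.drop m) = true →
      (W (sl.drop m) (List.replicate (sl.length - m) 1)
          = ((d : Int) + 1) + W (sl.drop (m + d + 1)) (List.replicate (sl.length - (m + d + 1)) 1)
        ∧ wfm (sl.drop (m + d + 1)) = true) := by
  intro d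
  induction d with
  | zero =>
    intro m hm hnp hwf
    have hm' : m < sl.length := by omega
    have hd : sl.drop m = sl[m] :: sl.drop (m + 1) := List.drop_eq_getElem_cons hm'
    have hc : sl[m] ≠ '(' := by
      intro h
      exact hnp m le_rfl (by omega) (by rw [List.getElem?_eq_getElem hm', h])
    rw [hd] at hwf ⊢
    rw [wfm_lit _ hc] at hwf
    constructor
    · rw [W_lit _ _ hc]
      have h1 : sl.length - m = (sl.length - (m + 1)) + 1 := by omega
      rw [h1, List.replicate_succ]
      simp [W]
    · simpa using hwf
  | succ d ih =>
    intro m hm hnp hwf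
    have hm' : m < sl.length := by omega
    have hd : sl.drop m = sl[m] :: sl.drop (m + 1) := List.drop_eq_getElem_cons hm'
    have hc : sl[m] ≠ '(' := by
      intro h
      exact hnp m le_rfl (by omega) (by rw [List.getElem?_eq_getElem hm', h])
    have hwf' : wfm (sl.drop (m + 1)) = true := by
      rw [hd, wfm_lit _ hc] at hwf; exact hwf
    obtain ⟨hW, hwf''⟩ := ih (m + 1) (by omega) (fun k hk1 hk2 => hnp k (by omega) (by omega)) hwf'
    constructor
    · rw [hd, W_lit _ _ hc]
      have h1 : sl.length - m = (sl.length - (m + 1)) + 1 := by omega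
      rw [h1, List.replicate_succ]
      simp only [List.headD_cons, List.tail_cons]
      rw [hW, show m + 1 + d + 1 = m + (d + 1) + 1 by omega]
      push_cast
      ring
    · rw [show m + (d + 1) + 1 = m + 1 + d + 1 by omega]
      exact hwf''

theorem wfm_append_aux : ∀ (n : Nat) (p : List Char), p.length ≤ n →
    ∀ (q : List Char), wfm p = true → wfm q = true → wfm (p ++ q) = true := by
  intro n
  induction n with
  | zero =>
    intro p hp q hwp hwq
    have : p = [] := by cases p with | nil => rfl | cons x xs => simp at hp
    subst this; rw [List.nil_append]; exact hwq
  | succ n ih =>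
    intro p hp q hwp hwq
    match p with
    | [] => rw [List.nil_append]; exact hwq
    | c :: r =>
      by_cases hc : c = '('
      · subst hc
        cases hpm : parseMarker r with
        | none => rw [wfm_marker_none hpm] at hwp; cases hwp
        | some t =>
          obtain ⟨j, a, b', rest⟩ := t
          obtain ⟨hrlen, hale⟩ := parseMarker_len hpm
          have hwp' := (wfm_marker hpm) ▸ hwp
          obtain ⟨hw1, hw2⟩ := Bool.and_eq_true .. |>.mp hwp'
          have hpq : parseMarker (r ++ q) = some (j, a, b', rest ++ q) := parseMarker_append hpm
          rw [List.cons_append, wfm_marker hpq]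
          rw [List.take_append_of_le_length hale, List.drop_append_of_le_length hale]
          rw [hw1, ih (rest.drop a) (by simp at hp ⊢; omega) q hw2 hwq]
          rfl
      · rw [List.cons_append, wfm_lit _ hc]
        rw [wfm_lit _ hc] at hwp
        exact ih r (by simp at hp; omega) q hwp hwq

theorem wfm_append (p q : List Char) (hwp : wfm p = true) (hwq : wfm q = true) :
    wfm (p ++ q) = true := wfm_append_aux p.length p le_rfl q hwp hwq

theorem marker_facts (sl r : List Char) {j a : Nat} {b : Int} {rest : List Char} (n : Nat)
    (hd : sl.drop n = '(' :: r) (hp : parseMarker r = some (j, a, b, rest)) :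
    r = sl.drop (n + 1) ∧ rest = sl.drop (n + j + 2) ∧ sl.length = n + j + 2 + rest.length := by
  have h1 : r = sl.drop (n + 1) := by
    have h2 : (sl.drop n).drop 1 = sl.drop (n + 1) := List.drop_drop ..
    rw [hd] at h2; simpa using h2
  obtain ⟨hrlen, hale⟩ := parseMarker_len hp
  obtain ⟨A, B, av, hr, hj, -, -, -, -, -, -, -, -⟩ := parseMarker_some hp
  have hrest : rest = r.drop (j + 1) := by
    rw [hr, drop_append_ge _ _ _ (by simp; omega)]
    have : j + 1 - (A ++ 'x' :: B).length = 1 := by simp; omega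
    rw [this]; simp
  have h3 : rest = sl.drop (n + j + 2) := by
    rw [hrest, h1, List.drop_drop]
    congr 1; omega
  refine ⟨h1, h3, ?_⟩
  have h4 := congrArg List.length hd
  rw [List.length_drop] at h4
  simp only [List.length_cons] at h4
  omega

theorem pyGet?_one {α : Type} (x y : α) (t : List α) : PySem.List.pyGet? (x :: y :: t) 1 = some y := by
  rw [show (1 : Int) = ((0 : Nat) : Int) + 1 by simp, PySem.List.pyGet?_cons_succ]
  exact PySem.List.pyGet?_zero_cons ..

theorem loopA_spec : ∀ (g : Nat) (sl : List Char) (n : Nat) (acc : Int),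
    n ≤ sl.length → wfm (sl.drop n) = true → g ≥ sl.length - n + 1 →
    loopA g sl ((sl.length : Int) - 1) (n : Int) acc
      = acc + W (sl.drop n) (List.replicate (sl.length - n) 1) := by
  intro g
  induction g with
  | zero => intro sl n acc h1 h2 h3; omega
  | succ g ih =>
    intro sl n acc hn hwf hg
    by_cases hlt : n < sl.length
    · have hd0 : sl.drop n = sl[n] :: sl.drop (n + 1) := List.drop_eq_getElem_cons hlt
      have hget : PySem.List.pyGet? sl (n : Int) = some sl[n] := by
        rw [PySem.List.pyGet?_natCast]; simp
      by_cases hc : sl[n] = '('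
      · -- marker branch
        rw [hd0, hc] at hwf
        cases hpm : parseMarker (sl.drop (n + 1)) with
        | none => rw [wfm_marker_none hpm] at hwf; cases hwf
        | some t =>
          obtain ⟨j, a, b, rest⟩ := t
          obtain ⟨-, hrest, hlen⟩ := marker_facts sl (sl.drop (n + 1)) n (by rw [hd0, hc]) hpm
          obtain ⟨hrlen, hale⟩ := parseMarker_len hpm
          have hwf' := (wfm_marker hpm) ▸ hwf
          obtain ⟨hw1, hw2⟩ := Bool.and_eq_true .. |>.mp hwf'
          obtain ⟨A, B, av, hr, hj, hnp, hA, hB, hofA, hav, hatoNat, hofB, -⟩ := parseMarker_some hpm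
          have hjlen : (A ++ 'x' :: B).length = j := by simp; omega
          have hcontent : (sl.drop (n + 1)).take j = A ++ 'x' :: B := by
            rw [hr, ← hjlen, List.take_left]
          have hdAB : sl.drop (n + 1) = (A ++ 'x' :: B) ++ ')' :: rest := hr
          have hnpc : ')' ∉ A ++ 'x' :: B := hnp
          -- the closing bracket scan
          have hfc : findCloseA sl ((sl.length : Int) - 1) (sl.length + 2) (n : Int)
              = some ((n + 1 + j : Nat) : Int) := by
            rw [← hjlen]
            exact findCloseA_spec sl (A ++ 'x' :: B) (sl.length + 2) n rest hdAB hnpc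
              (by have := congrArg List.length hdAB; simp at this; omega)
          -- the content slice
          have hslice : PySem.List.slice sl (some ((n : Int) + 1)) (some ((n + 1 + j : Nat) : Int))
              = A ++ 'x' :: B := by
            rw [show ((n : Int) + 1) = ((n + 1 : Nat) : Int) by omega, PySem.List.slice_natCast,
                show (n + 1 + j) - (n + 1) = j by omega]
            exact hcontent
          have hsplit : PySem.Chars.splitOn (A ++ 'x' :: B) ['x'] = [A, B] := splitOn_two A B hA hB
          have havInt : (a : Int) = av := by rw [hatoNat]; exact Int.toNat_of_nonneg hav
          -- the recursion slice
          have hslice2 : PySem.List.slice sl (some (((n + 1 + j : Nat) : Int) + 1))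
              (some (((n + 1 + j : Nat) : Int) + 1 + av)) = rest.take a := by
            rw [show (((n + 1 + j : Nat) : Int) + 1) = ((n + j + 2 : Nat) : Int) by omega,
                show ((n + j + 2 : Nat) : Int) + av = ((n + j + 2 + a : Nat) : Int) by
                  rw [← havInt]; push_cast; ring,
                PySem.List.slice_natCast, show (n + j + 2 + a) - (n + j + 2) = a by omega, ← hrest]
          have hslicelen : (rest.take a).length = a := by simp; omega
          -- step the loop
          have hbind1 : (PySem.List.pyGet? [A, B] 0 >>= PySem.Int.ofChars?) = some av := by
            rw [PySem.List.pyGet?_zero_cons]; exact hofA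
          have hbind2 : (PySem.List.pyGet? [A, B] 1 >>= PySem.Int.ofChars?) = some b := by
            rw [pyGet?_one]; exact hofB
          rw [loopA, if_pos (by push_cast; omega), hget]
          simp only [hc, if_pos rfl, if_true, hfc, hslice, hsplit, hbind1, hbind2]
          -- nested call
          rw [hslice2, PySem.List.len_eq, hslicelen]
          have hnest : loopA g (rest.take a) ((a : Int) - 1) ((0 : Nat) : Int) 0
              = 0 + W (rest.take a) (List.replicate a 1) := by
            have h5 := ih (rest.take a) 0 0 (by omega) (by simpa using hw1) (by rw [hslicelen]; omega)
            rw [hslicelen] at h5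
            simpa using h5
          simp only [Nat.cast_zero] at hnest
          rw [hnest]
          -- continuation
          have hwfcont : wfm (sl.drop (n + j + 2 + a)) = true := by
            rw [show n + j + 2 + a = (n + j + 2) + a by omega, ← List.drop_drop, ← hrest]
            exact hw2
          rw [show (((n + 1 + j : Nat) : Int) + (av + 1)) = ((n + j + 2 + a : Nat) : Int) by
                rw [← havInt]; push_cast; ring]
          rw [ih sl (n + j + 2 + a) _ (by omega) hwfcont (by omega)]
          -- assemble
          have hdropa : rest.drop a = sl.drop (n + j + 2 + a) := by
            rw [hrest, List.drop_drop, show (n + j + 2) + a = n + j + 2 + a by omega]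
          rw [hd0, hc, W_marker _ hpm]
          rw [List.drop_replicate, List.take_replicate, List.drop_replicate]
          rw [show min a (sl.length - n - (j + 2)) = a by omega]
          rw [← hdropa, show sl.length - n - (j + 2) - a = sl.length - (n + j + 2 + a) by omega]
          ring
      · -- literal branch
        obtain ⟨e, hre, he1, he2, he3, -⟩ :=
          runEndA_spec sl (sl.length + 2) n hlt (by omega)
        obtain ⟨hW, hwf2⟩ := W_lit_run sl (e - n) n (by omega)
          (fun k hk1 hk2 => by
            by_cases hkn : k = n
            · subst hkn; rw [List.getElem?_eq_getElem hlt]; simp [hc]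
            · exact he3 k (by omega) (by omega))
          hwf
        rw [loopA, if_pos (by push_cast; omega), hget]
        simp only [if_neg hc]
        rw [hre, show ((e : Int) + 1) = ((e + 1 : Nat) : Int) by omega]
        rw [ih sl (e + 1) _ (by omega) (by rw [show e + 1 = n + (e - n) + 1 by omega]; exact hwf2) (by omega)]
        rw [show n + (e - n) + 1 = e + 1 by omega] at hW
        rw [hW, Nat.cast_sub he1]
        ring
    · have hn' : n = sl.length := by omega
      rw [loopA, if_neg (by push_cast; omega)]
      rw [List.drop_of_length_le (by omega)]
      simp [W_nil]

theorem findFrom_marker (sl content rest : List Char) (n : Nat)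
    (hd : sl.drop n = '(' :: (content ++ ')' :: rest)) (hnc : ')' ∉ content) :
    PySem.Chars.findFrom sl [')'] (n : Int) none = ((n + 1 + content.length : Nat) : Int) := by
  have hlen : n < sl.length := by
    have := congrArg List.length hd; simp at this; omega
  have hsplit : sl.drop n = ('(' :: content) ++ ')' :: rest := by rw [hd]; simp
  have hinf : [')'] <:+: sl.drop n := ⟨'(' :: content, rest, by rw [hsplit]; simp⟩
  have hnn : 0 ≤ PySem.Chars.find (sl.drop n) [')'] :=
    (PySem.Chars.find_nonneg_iff _ _).mpr hinf
  obtain ⟨hpre, hmin⟩ := PySem.Chars.find_spec hnn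
  set f := (PySem.Chars.find (sl.drop n) [')']).toNat with hfdef
  have hdropc : (sl.drop n).drop (1 + content.length) = ')' :: rest := by
    rw [hsplit, show 1 + content.length = ('(' :: content).length by simp [Nat.add_comm],
        List.drop_left]
  have htn : f = 1 + content.length := by
    rcases Nat.lt_trichotomy f (1 + content.length) with hlt | heq | hgt
    · exfalso
      obtain ⟨t, ht⟩ := hpre
      have hget : (sl.drop n)[f]? = some ')' := by
        have h1 : ((sl.drop n).drop f)[(0 : Nat)]?
            = (sl.drop n)[f + 0]? := List.getElem?_drop ..
        rw [← ht] at h1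
        simpa using h1.symm
      rw [hsplit, List.getElem?_append, if_pos (by simp; omega)] at hget
      have : ')' ∈ '(' :: content := List.mem_of_getElem? hget
      rcases List.mem_cons.mp this with h | h
      · cases h
      · exact hnc h
    · exact heq
    · exfalso
      exact hmin (1 + content.length) hgt ⟨rest, by rw [hdropc]; rfl⟩
  have hf : PySem.Chars.find (sl.drop n) [')'] = ((1 + content.length : Nat) : Int) := by
    omega
  rw [PySem.Chars.findFrom_natCast sl [')'] n (by omega), hf]
  rw [if_neg (by omega)]
  push_cast; ring

theorem mulLoopB_spec (b : Int) : ∀ (a s : Nat) (w : List Int), s + a ≤ w.length →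
    mulLoopB b (s : Int) ((s + a : Nat) : Int) w
      = w.take s ++ ((w.drop s).take a).map (fun v => v * b) ++ w.drop (s + a) := by
  intro a
  induction a with
  | zero =>
    intro s w hsa
    unfold mulLoopB
    rw [show ((s + 0 : Nat) : Int) = (s : Int) by omega, PySem.List.pyRange_one_eq_nil le_rfl]
    simp
  | succ a ih =>
    intro s w hsa
    unfold mulLoopB
    rw [show ((s + (a + 1) : Nat) : Int) = ((s + a : Nat) : Int) + 1 by omega,
        PySem.List.pyRange_one_succ_right (by omega), List.foldl_append]
    rw [show (PySem.List.pyRange (s : Int) ((s + a : Nat) : Int) 1).foldl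
          (fun w k => PySem.List.pySetD w k (PySem.List.pyGetD w k 0 * b)) w
        = mulLoopB b (s : Int) ((s + a : Nat) : Int) w from rfl]
    rw [ih s w (by omega)]
    simp only [List.foldl_cons, List.foldl_nil]
    have hlenM : (((w.drop s).take a).map (fun v => v * b)).length = a := by
      simp; omega
    have hlenpre : (w.take s ++ ((w.drop s).take a).map (fun v => v * b)).length = s + a := by
      simp; omega
    have hassoc : w.take s ++ ((w.drop s).take a).map (fun v => v * b) ++ w.drop (s + a)
        = (w.take s ++ ((w.drop s).take a).map (fun v => v * b)) ++ w.drop (s + a) := by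
      simp
    have hgetP : PySem.List.pyGetD
        (w.take s ++ ((w.drop s).take a).map (fun v => v * b) ++ w.drop (s + a))
        ((s + a : Nat) : Int) 0 = w[s + a]'(by omega) := by
      rw [PySem.List.pyGetD_natCast, hassoc]
      rw [List.getD_eq_getElem?_getD, List.getElem?_append_right (by omega)]
      rw [hlenpre, Nat.sub_self]
      rw [List.getElem?_drop, Nat.add_zero, List.getElem?_eq_getElem (by omega)]
      simp
    rw [hgetP, PySem.List.pySetD_natCast, hassoc]
    rw [List.set_append_right _ _ (by omega), hlenpre, Nat.sub_self]
    rw [List.drop_eq_getElem_cons (by omega : s + a < w.length), List.set_cons_zero]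
    rw [show (w.drop s).take (a + 1)
        = (w.drop s).take a ++ [w[s + a]'(by omega)] by
      rw [List.take_succ]
      congr 1
      rw [List.getElem?_drop, List.getElem?_eq_getElem (by omega)]
      simp]
    simp [List.map_append]
    omega

theorem loopB_spec : ∀ (g : Nat) (sl : List Char) (n : Nat) (w : List Int) (tot : Int),
    n ≤ sl.length → wfm (sl.drop n) = true → w.length = sl.length → g ≥ sl.length - n + 1 →
    loopB g sl (n : Int) w tot = tot + W (sl.drop n) (w.drop n) := by
  intro g
  induction g with
  | zero => intro sl n w tot h1 h2 h3 h4; omega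
  | succ g ih =>
    intro sl n w tot hn hwf hwlen hg
    by_cases hlt : n < sl.length
    · have hd0 : sl.drop n = sl[n] :: sl.drop (n + 1) := List.drop_eq_getElem_cons hlt
      have hget : PySem.List.pyGet? sl (n : Int) = some sl[n] := by
        rw [PySem.List.pyGet?_natCast]; simp
      by_cases hc : sl[n] = '('
      · -- marker branch
        rw [hd0, hc] at hwf
        cases hpm : parseMarker (sl.drop (n + 1)) with
        | none => rw [wfm_marker_none hpm] at hwf; cases hwf
        | some t =>
          obtain ⟨j, a, b, rest⟩ := t
          obtain ⟨-, hrest, hlen⟩ := marker_facts sl (sl.drop (n + 1)) n (by rw [hd0, hc]) hpm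
          obtain ⟨hrlen, hale⟩ := parseMarker_len hpm
          have hwf' := (wfm_marker hpm) ▸ hwf
          obtain ⟨hw1, hw2⟩ := Bool.and_eq_true .. |>.mp hwf'
          obtain ⟨A, B, av, hr, hj, hnp, hA, hB, hofA, hav, hatoNat, hofB, -⟩ := parseMarker_some hpm
          have hjlen : (A ++ 'x' :: B).length = j := by simp; omega
          have hcontent : (sl.drop (n + 1)).take j = A ++ 'x' :: B := by
            rw [hr, ← hjlen, List.take_left]
          have havInt : (a : Int) = av := by rw [hatoNat]; exact Int.toNat_of_nonneg hav
          have hfind : PySem.Chars.findFrom sl [')'] (n : Int) none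
              = ((n + 1 + j : Nat) : Int) := by
            rw [← hjlen]
            exact findFrom_marker sl (A ++ 'x' :: B) rest n (by rw [hd0, hc, hr]; try simp) hnp
          have hslice : PySem.List.slice sl (some ((n : Int) + 1)) (some ((n + 1 + j : Nat) : Int))
              = A ++ 'x' :: B := by
            rw [show ((n : Int) + 1) = ((n + 1 : Nat) : Int) by omega, PySem.List.slice_natCast,
                show (n + 1 + j) - (n + 1) = j by omega]
            exact hcontent
          have hsplit : PySem.Chars.splitOn (A ++ 'x' :: B) ['x'] = [A, B] := splitOn_two A B hA hB
          -- step the loop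
          rw [loopB, if_pos (by rw [PySem.List.len_eq]; push_cast; omega), hget]
          simp only [hc, if_pos rfl, if_true, hfind]
          rw [if_neg (by omega)]
          simp only [hslice, hsplit, hofA, hofB]
          -- the weight-multiplication loop
          have hmin : min (((n + j + 2 : Nat) : Int) + av) (PySem.List.len sl)
              = (((n + j + 2) + a : Nat) : Int) := by
            rw [PySem.List.len_eq, min_eq_left (by rw [← havInt]; push_cast; omega)]
            rw [← havInt]; push_cast; ring
          rw [show (((n + 1 + j : Nat) : Int) + 1) = ((n + j + 2 : Nat) : Int) by omega, hmin]
          rw [mulLoopB_spec b a (n + j + 2) w (by omega)]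
          -- the recursive step
          have hwfrest : wfm (sl.drop (n + j + 2)) = true := by
            rw [← hrest]
            have h5 := wfm_append (rest.take a) (rest.drop a) hw1 hw2
            rwa [List.take_append_drop] at h5
          have hw'len : (w.take (n + j + 2) ++ ((w.drop (n + j + 2)).take a).map (fun v => v * b)
              ++ w.drop (n + j + 2 + a)).length = sl.length := by
            simp; omega
          rw [ih sl (n + j + 2) _ tot (by omega) hwfrest hw'len (by omega)]
          -- compute the dropped weight list
          have hdropw' : (w.take (n + j + 2) ++ ((w.drop (n + j + 2)).take a).map (fun v => v * b)
                ++ w.drop (n + j + 2 + a)).drop (n + j + 2)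
              = ((w.drop (n + j + 2)).take a).map (fun v => v * b) ++ w.drop (n + j + 2 + a) := by
            have hXlen : (w.take (n + j + 2)).length = n + j + 2 := by simp; omega
            rw [List.drop_append_of_le_length (by rw [List.length_append, hXlen]; omega)]
            rw [drop_append_ge _ _ _ (by rw [hXlen])]
            rw [hXlen, Nat.sub_self, List.drop_zero]
          rw [hdropw', ← hrest]
          -- split the spec along the marker body
          have hMlen : (((w.drop (n + j + 2)).take a).map (fun v => v * b)).length
              = (rest.take a).length := by simp; omega
          have hsplitW : W rest (((w.drop (n + j + 2)).take a).map (fun v => v * b)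
                ++ w.drop (n + j + 2 + a))
              = W (rest.take a) (((w.drop (n + j + 2)).take a).map (fun v => v * b))
                + W (rest.drop a) (w.drop (n + j + 2 + a)) := by
            conv_lhs => rw [← List.take_append_drop a rest]
            exact W_append _ _ _ _ hw1 hMlen
          rw [hsplitW, W_mul]
          -- and the right-hand side
          rw [hd0, hc, W_marker _ hpm]
          simp only [List.drop_drop]
          rw [show n + (j + 2) = n + j + 2 by omega]
          ring
      · -- literal branch
        have hgetD : PySem.List.pyGetD w (n : Int) 0 = w[n]'(by omega) := by
          rw [PySem.List.pyGetD_natCast, List.getD_eq_getElem?_getD,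
              List.getElem?_eq_getElem (by omega)]
          simp
        have hdw : w.drop n = w[n]'(by omega) :: w.drop (n + 1) :=
          List.drop_eq_getElem_cons (by omega)
        have hwf' : wfm (sl.drop (n + 1)) = true := by
          rw [hd0, wfm_lit _ hc] at hwf; exact hwf
        rw [loopB, if_pos (by rw [PySem.List.len_eq]; push_cast; omega), hget]
        simp only [if_neg hc]
        rw [hgetD, show ((n : Int) + 1) = ((n + 1 : Nat) : Int) by omega]
        rw [ih sl (n + 1) w _ (by omega) hwf' hwlen (by omega)]
        rw [hd0, W_lit _ _ hc, hdw]
        simp only [List.headD_cons, List.tail_cons]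
        ring
    · have hn' : n = sl.length := by omega
      rw [loopB, if_neg (by rw [PySem.List.len_eq]; push_cast; omega)]
      rw [List.drop_of_length_le (by omega)]
      simp [W_nil]

-- ===== VERDICT (by name: the statement is the Claim_ definition above) =====
theorem taskTwo_spec : Claim_equal_taskTwo := by
  intro s _ hpre
  unfold Spec_taskTwo taskTwo taskTwo_alt
  have hA := loopA_spec (s.toList.length + 1) s.toList 0 0 (by omega) (by simpa using hpre)
    (by omega)
  have hB := loopB_spec (s.toList.length + 1) s.toList 0 (List.replicate s.toList.length 1) 0
    (by omega) (by simpa using hpre) (by simp) (by omega)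
  simp only [Nat.cast_zero, List.drop_zero, Nat.sub_zero] at hA hB
  change loopA (s.toList.length + 1) s.toList (PySem.List.len s.toList - 1) 0 0
      = loopB (s.toList.length + 1) s.toList 0 (List.replicate s.toList.length 1) 0
  rw [PySem.List.len_eq, hA, hB]
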